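-- pv_equiv track=rewrite | github.com/mihkeluutar/simplex-practical-experiments | Utilities/input_gen_utils.py | generate_geometric_simplex_input
-- ===== SOURCE A (Python) =====
-- def generate_geometric_simplex_input(inequalities_n, variables_n, min_val=1, max_val=1000):
--     # Generating objective function as a geometric progression
--     A = [min(min_val * 2**i, max_val) for i in range(variables_n)]
--
--     # Generates inequalities as a geometric progression
--     b = []
--     for i in range(inequalities_n):
--         row = [min_val] * variables_n
--         for j in range(variables_n):  # Making sure variable value is not larger than max_val
--             value = min_val * 2**(i+j)
--             row[j] = min(value, max_val)
--         b.append(row)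
--
--     # Generates inequality values as a geometric progression
--     c = [min(min_val * 2**(i+1) - 1, max_val) for i in range(variables_n)]
--
--     return A, b, c
-- ===== SOURCE B (Python) =====
-- def generate_geometric_simplex_input(inequalities_n, variables_n, min_val=1, max_val=1000):
--     # Build one shared geometric table and take windowed slices of it,
--     # instead of recomputing min(min_val * 2**(i+j), max_val) cell by cell.
--     w = max(variables_n, 0)
--     h = max(inequalities_n, 0)
--     n_geo = w + max(h - 1, 0) if w > 0 else 0  # no columns -> no table needed
--     geo = [min(min_val * 2 ** k, max_val) for k in range(n_geo)]
--     A = geo[:w]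
--     b = [geo[i:i + w] for i in range(h)]
--     c = [min(min_val * 2 ** (i + 1) - 1, max_val) for i in range(w)]
--     return A, b, c
-- ===== Notes on version B (the rewrite author's own statement) =====
-- stated objective: faster
-- what changed: B precomputes one shared geometric table geo[k]=min(min_val*2**k,max_val) and builds A as geo[:w] and each row of b as the windowed slice geo[i:i+w], replacing A's nested per-cell loop with its repeated 2**(i+j) big-int exponentiation.
import Mathlib
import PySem

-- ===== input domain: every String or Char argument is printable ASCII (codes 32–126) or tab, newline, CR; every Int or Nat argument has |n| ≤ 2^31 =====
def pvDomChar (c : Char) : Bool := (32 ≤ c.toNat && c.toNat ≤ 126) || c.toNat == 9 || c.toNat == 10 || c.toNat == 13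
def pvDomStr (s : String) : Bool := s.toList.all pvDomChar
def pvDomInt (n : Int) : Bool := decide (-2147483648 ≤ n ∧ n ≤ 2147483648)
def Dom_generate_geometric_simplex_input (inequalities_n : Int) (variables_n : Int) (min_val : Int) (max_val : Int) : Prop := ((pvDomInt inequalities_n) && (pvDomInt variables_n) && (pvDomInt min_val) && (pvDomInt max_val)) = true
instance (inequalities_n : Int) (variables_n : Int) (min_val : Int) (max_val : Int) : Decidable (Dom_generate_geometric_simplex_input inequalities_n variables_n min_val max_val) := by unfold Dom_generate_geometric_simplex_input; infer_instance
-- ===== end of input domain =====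

-- B builds one shared geometric table and slices windows from it instead of A's
-- per-cell nested loop with repeated exponentiation (objective: faster).

-- ===== PORT A =====
def generate_geometric_simplex_input (inequalities_n : Int) (variables_n : Int) (min_val : Int) (max_val : Int) : List Int × List (List Int) × List Int :=
  -- A = [min(min_val * 2**i, max_val) for i in range(variables_n)]
  let A := (PySem.List.pyRange 0 variables_n 1).map (fun i => min (min_val * 2 ^ i.toNat) max_val)
  -- for i in range(inequalities_n): row = [min_val]*variables_n; for j: row[j] = min(...); b.append(row)
  let b := (PySem.List.pyRange 0 inequalities_n 1).foldl
    (fun acc i =>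
      acc ++ [ (PySem.List.pyRange 0 variables_n 1).foldl
        (fun row j => row.set j.toNat (min (min_val * 2 ^ (i + j).toNat) max_val))
        (List.replicate variables_n.toNat min_val) ])
    []
  -- c = [min(min_val * 2**(i+1) - 1, max_val) for i in range(variables_n)]
  let c := (PySem.List.pyRange 0 variables_n 1).map (fun i => min (min_val * 2 ^ (i + 1).toNat - 1) max_val)
  (A, b, c)

-- ===== PORT B =====
def generate_geometric_simplex_input_alt (inequalities_n : Int) (variables_n : Int) (min_val : Int) (max_val : Int) : List Int × List (List Int) × List Int :=
  let w : Int := max variables_n 0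
  let h : Int := max inequalities_n 0
  -- geo = [min(min_val * 2**k, max_val) for k in range(w + max(h-1, 0) if w > 0 else 0)]
  let geo := (PySem.List.pyRange 0 (if 0 < w then w + max (h - 1) 0 else 0) 1).map (fun k => min (min_val * 2 ^ k.toNat) max_val)
  let A := PySem.List.slice geo none (some w)
  let b := (PySem.List.pyRange 0 h 1).map (fun i => PySem.List.slice geo (some i) (some (i + w)))
  let c := (PySem.List.pyRange 0 w 1).map (fun i => min (min_val * 2 ^ (i + 1).toNat - 1) max_val)
  (A, b, c)

-- ===== PRECONDITION & SPEC =====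
def Spec_generate_geometric_simplex_input (inequalities_n : Int) (variables_n : Int) (min_val : Int) (max_val : Int) (out : List Int × List (List Int) × List Int) : Prop := out = generate_geometric_simplex_input_alt inequalities_n variables_n min_val max_val
instance (inequalities_n : Int) (variables_n : Int) (min_val : Int) (max_val : Int) (out : List Int × List (List Int) × List Int) : Decidable (Spec_generate_geometric_simplex_input inequalities_n variables_n min_val max_val out) := by unfold Spec_generate_geometric_simplex_input; infer_instance

-- ===== CLAIM (what is proved, stated in full; the proofs are below) =====
def Claim_equal_generate_geometric_simplex_input : Prop := ∀ (inequalities_n : Int) (variables_n : Int) (min_val : Int) (max_val : Int), Dom_generate_geometric_simplex_input inequalities_n variables_n min_val max_val → Spec_generate_geometric_simplex_input inequalities_n variables_n min_val max_val (generate_geometric_simplex_input inequalities_n variables_n min_val max_val)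

-- ===== LEMMAS AND PROOFS =====

-- the shared cell value min(min_val * 2**k, max_val)
def gcell (mn mx : Int) (k : Nat) : Int := min (mn * 2 ^ k) mx

-- pyRange 0 n 1 only depends on n.toNat
theorem pyRange_zero_congr (a b : Int) (h : a.toNat = b.toNat) :
    PySem.List.pyRange 0 a 1 = PySem.List.pyRange 0 b 1 := by
  rw [PySem.List.pyRange_one, PySem.List.pyRange_one]
  simp [h]

-- the A-side inner loop writes cell j = F j into every position of a length-V list
theorem foldl_set_range (V : Nat) (F : Nat → Int) (l : List Int) (hl : l.length = V) :
    (List.range V).foldl (fun row j => row.set j (F j)) l = (List.range V).map F := by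
  suffices h : ∀ n, n ≤ V →
      (List.range n).foldl (fun row j => row.set j (F j)) l
        = (List.range n).map F ++ l.drop n by
    rw [h V le_rfl, ← hl, List.drop_length, List.append_nil]
  intro n hn
  induction n with
  | zero => simp
  | succ m ih =>
    have hm : m ≤ V := Nat.le_of_succ_le hn
    rw [List.range_succ, List.foldl_append, ih hm]
    have hmlen : m < l.length := by omega
    have hdrop : l.drop m = l[m] :: l.drop (m + 1) := (List.drop_eq_getElem_cons hmlen)
    simp only [List.foldl_cons, List.foldl_nil]
    rw [hdrop]
    simp only [List.map_append, List.map_cons, List.map_nil]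
    rw [List.set_append_right _ _ (by simp)]
    simp only [List.length_map, List.length_range, Nat.sub_self, List.set_cons_zero,
      List.append_assoc, List.cons_append, List.nil_append]

-- a window of the mapped range table
theorem drop_take_map_range (g : Nat → Int) (L a n : Nat) (h : a + n ≤ L) :
    (((List.range L).map g).drop a).take n = (List.range n).map (fun j => g (a + j)) := by
  apply List.ext_getElem
  · simp; omega
  · intro k h1 h2
    simp

-- append-accumulator loop is a map
theorem foldl_append_map {A B : Type} (f : A → B) (l : List A) (acc : List B) :
    l.foldl (fun acc x => acc ++ [f x]) acc = acc ++ l.map f := by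
  induction l generalizing acc with
  | nil => simp
  | cons x xs ih => simp [ih]

-- the shared table, in canonical form
theorem geo_canon (q v mn mx : Int) :
    (PySem.List.pyRange 0 (if 0 < max v 0 then max v 0 + max (max q 0 - 1) 0 else 0) 1).map (fun k => min (mn * 2 ^ k.toNat) mx)
      = (List.range (if 0 < v then v.toNat + (q - 1).toNat else 0)).map (gcell mn mx) := by
  rw [PySem.List.pyRange_one, List.map_map]
  have hL : ((if 0 < max v 0 then max v 0 + max (max q 0 - 1) 0 else 0) - 0).toNat
      = (if 0 < v then v.toNat + (q - 1).toNat else 0) := by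
    rcases (by omega : v ≤ 0 ∨ 0 < v) with h | h
    · rw [if_neg (by omega), if_neg (by omega)]
      simp
    · rw [if_pos (by omega), if_pos h]
      omega
  rw [hL]
  apply List.map_congr_left
  intro k _
  simp [gcell]

theorem partA (q v mn mx : Int) :
    (PySem.List.pyRange 0 v 1).map (fun i => min (mn * 2 ^ i.toNat) mx)
      = PySem.List.slice ((PySem.List.pyRange 0 (if 0 < max v 0 then max v 0 + max (max q 0 - 1) 0 else 0) 1).map
          (fun k => min (mn * 2 ^ k.toNat) mx)) none (some (max v 0)) := by
  rw [geo_canon, PySem.List.slice_to _ (le_max_right v 0)]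
  have h1 := drop_take_map_range (gcell mn mx) (if 0 < v then v.toNat + (q - 1).toNat else 0) 0
    v.toNat (by split <;> omega)
  simp only [List.drop_zero, zero_add] at h1
  have hw : (max v 0).toNat = v.toNat := by omega
  rw [hw, h1, PySem.List.pyRange_one, List.map_map]
  have h0 : (v - 0).toNat = v.toNat := by omega
  rw [h0]
  apply List.map_congr_left
  intro k _
  simp [gcell]

theorem partC (v mn mx : Int) :
    (PySem.List.pyRange 0 v 1).map (fun i => min (mn * 2 ^ (i + 1).toNat - 1) mx)
      = (PySem.List.pyRange 0 (max v 0) 1).map (fun i => min (mn * 2 ^ (i + 1).toNat - 1) mx) := by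
  rw [pyRange_zero_congr v (max v 0) (by omega)]

theorem partB (q v mn mx : Int) :
    (PySem.List.pyRange 0 q 1).foldl
      (fun acc i => acc ++ [ (PySem.List.pyRange 0 v 1).foldl
          (fun row j => row.set j.toNat (min (mn * 2 ^ (i + j).toNat) mx))
          (List.replicate v.toNat mn) ]) []
      = (PySem.List.pyRange 0 (max q 0) 1).map (fun i =>
          PySem.List.slice ((PySem.List.pyRange 0 (if 0 < max v 0 then max v 0 + max (max q 0 - 1) 0 else 0) 1).map
            (fun k => min (mn * 2 ^ k.toNat) mx)) (some i) (some (i + max v 0))) := by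
  rw [geo_canon, foldl_append_map, List.nil_append,
    pyRange_zero_congr q (max q 0) (by omega), PySem.List.pyRange_one 0 (max q 0), List.map_map, List.map_map]
  apply List.map_congr_left
  intro i' hi'
  have hi : i' < q.toNat := by
    have := List.mem_range.mp hi'
    omega
  -- right-hand side: the slice is a drop/take window of the table
  rw [Function.comp_apply, Function.comp_apply,
    PySem.List.slice_toNat _ (by omega) (by omega)]
  have ha : ((0 : Int) + (i' : Int)).toNat = i' := by omega
  have hb2 : ((0 : Int) + (i' : Int) + max v 0).toNat = i' + v.toNat := by omega
  rw [ha, hb2, Nat.add_sub_cancel_left]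
  rcases (by omega : v ≤ 0 ∨ 0 < v) with hv | hv
  · -- no columns: both sides are the empty row
    have hv0 : v.toNat = 0 := by omega
    rw [PySem.List.pyRange_one_eq_nil (by omega : v ≤ 0)]
    simp [hv0]
  rw [drop_take_map_range (gcell mn mx) _ i' v.toNat (by rw [if_pos hv]; omega)]
  -- left-hand side: the inner write-every-cell loop is the same map
  rw [PySem.List.pyRange_one 0 v, List.foldl_map]
  have hcast : ∀ (a b : Nat), ((a : Int) + (b : Int)).toNat = a + b := by intro a b; omega
  simp only [zero_add, Int.toNat_natCast, hcast, Int.sub_zero]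
  have h := foldl_set_range v.toNat (fun j => gcell mn mx (i' + j)) (List.replicate v.toNat mn)
    (by simp)
  simpa [gcell] using h

-- ===== VERDICT (by name: the statement is the Claim_ definition above) =====
theorem generate_geometric_simplex_input_spec : Claim_equal_generate_geometric_simplex_input := by
  intro q v mn mx _
  unfold Spec_generate_geometric_simplex_input generate_geometric_simplex_input
    generate_geometric_simplex_input_alt
  dsimp only
  rw [Prod.mk.injEq, Prod.mk.injEq]
  exact ⟨partA q v mn mx, partB q v mn mx, partC v mn mx⟩
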